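-- pv_equiv track=rewrite | github.com/cyanjz/TIL | Coding_practice/CodeTree/5_tetris/main.py | is_dup
-- ===== SOURCE A (Python) =====
-- def is_dup(block1, block2):
--     dup_count = 0
--     # 16번 loop
--     for i in range(len(block1)):
--         for j in range(len(block2)):
--             if block1[i] == block2[j]:
--                 dup_count += 1
--     # 블록이 정확히 같은 경우에 False return
--     if dup_count == len(block1):
--         return True
--     return False
-- ===== SOURCE B (Python) =====
-- def is_dup(block1, block2):
--     c1 = {}
--     for a in block1:
--         c1[a] = c1.get(a, 0) + 1
--     c2 = {}
--     for b in block2: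
--         c2[b] = c2.get(b, 0) + 1
--     total = 0
--     for k, v in c1.items():
--         total += v * c2.get(k, 0)
--     return total == len(block1)
-- ===== Notes on version B (the rewrite author's own statement) =====
-- stated objective: faster
-- what changed: Replaces the quadratic nested pair-counting loop by two hash-table frequency counters: the number of equal (i,j) pairs equals the sum of count1(x)*count2(x) over distinct x, compared against len(block1).
import Mathlib
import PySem

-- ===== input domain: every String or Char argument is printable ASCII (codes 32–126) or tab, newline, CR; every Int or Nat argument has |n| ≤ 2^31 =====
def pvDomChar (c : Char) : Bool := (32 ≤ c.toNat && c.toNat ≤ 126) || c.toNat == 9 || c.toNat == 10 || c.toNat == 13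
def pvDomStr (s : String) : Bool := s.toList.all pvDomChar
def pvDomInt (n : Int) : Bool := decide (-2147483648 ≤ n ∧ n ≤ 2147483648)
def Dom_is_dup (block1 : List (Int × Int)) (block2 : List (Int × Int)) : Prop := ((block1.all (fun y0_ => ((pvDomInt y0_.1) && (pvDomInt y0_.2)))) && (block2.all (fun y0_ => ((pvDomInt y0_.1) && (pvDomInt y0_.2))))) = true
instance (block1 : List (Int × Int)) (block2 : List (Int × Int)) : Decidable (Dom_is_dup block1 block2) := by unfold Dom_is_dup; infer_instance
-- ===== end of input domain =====

-- B replaces A's quadratic nested pair-count by two frequency dictionaries (faster: one pass per list).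
-- ===== PORT A =====
def is_dup (block1 : List (Int × Int)) (block2 : List (Int × Int)) : Bool :=
  -- dup_count = 0; for i in range(len(block1)): for j in range(len(block2)): if block1[i]==block2[j]: dup_count += 1
  if ((PySem.List.pyRange 0 block1.length 1).foldl (fun acc i =>
      (PySem.List.pyRange 0 block2.length 1).foldl (fun acc j =>
        if PySem.List.pyGetD block1 i (0, 0) = PySem.List.pyGetD block2 j (0, 0) then acc + 1 else acc) acc) 0 : Int)
      = (block1.length : Int) then true else false

-- ===== PORT B =====
def is_dup_alt (block1 : List (Int × Int)) (block2 : List (Int × Int)) : Bool :=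
  -- c1[a] = c1.get(a,0)+1 for a in block1; same for c2; total = sum v*c2.get(k,0) over c1.items()
  decide (((block1.foldl (fun d a => d.insert a (d.getD a 0 + 1))
              (PySem.Dict.empty : PySem.Dict (Int × Int) Int)).items.foldl
      (fun acc kv => acc +
        kv.2 * (block2.foldl (fun d b => d.insert b (d.getD b 0 + 1))
                  (PySem.Dict.empty : PySem.Dict (Int × Int) Int)).getD kv.1 0) 0 : Int)
    = (block1.length : Int))

-- ===== PRECONDITION & SPEC =====
def Spec_is_dup (block1 : List (Int × Int)) (block2 : List (Int × Int)) (out : Bool) : Prop := out = is_dup_alt block1 block2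
instance (block1 : List (Int × Int)) (block2 : List (Int × Int)) (out : Bool) : Decidable (Spec_is_dup block1 block2 out) := by unfold Spec_is_dup; infer_instance

-- ===== CLAIM (what is proved, stated in full; the proofs are below) =====
def Claim_equal_is_dup : Prop := ∀ (block1 : List (Int × Int)) (block2 : List (Int × Int)), Dom_is_dup block1 block2 → Spec_is_dup block1 block2 (is_dup block1 block2)

-- ===== LEMMAS AND PROOFS =====

-- ===== VERDICT (by name: the statement is the Claim_ definition above) =====
-- A's value: the nested loop counts equal pairs = sum over block1 of block2.count
lemma is_dup_eq (b1 b2 : List (Int × Int)) :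
    is_dup b1 b2 = decide ((b1.map (fun x => (b2.count x : Int))).sum = (b1.length : Int)) := by
  unfold is_dup
  rw [PySem.List.foldl_pyRange_zero_pyGetD' b1 (0,0)
    (fun acc x => (PySem.List.pyRange 0 b2.length 1).foldl (fun acc j =>
        if x = PySem.List.pyGetD b2 j (0, 0) then acc + 1 else acc) acc) 0]
  have h : ∀ (x : Int × Int) (a : Int),
      (PySem.List.pyRange 0 b2.length 1).foldl (fun acc j =>
        if x = PySem.List.pyGetD b2 j (0, 0) then acc + 1 else acc) a
      = a + (b2.count x : Int) := by
    intro x a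
    rw [PySem.List.foldl_pyRange_zero_pyGetD' b2 (0,0)
      (fun acc y => if x = y then acc + 1 else acc) a]
    induction b2 generalizing a with
    | nil => simp
    | cons y ys ih =>
      simp only [List.foldl_cons, List.count_cons, ih]
      by_cases hxy : x = y
      · have h2 : (y == x) = true := by simp [hxy.symm]
        simp only [if_pos hxy, h2]
        push_cast; ring
      · have h2 : (y == x) = false := by simpa using fun h => hxy h.symm
        simp [hxy, h2]
  simp only [h]
  rw [PySem.List.foldl_add b1 (fun x => (b2.count x : Int)) 0]
  simp
lemma is_dup_alt_eq (b1 b2 : List (Int × Int)) :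
    is_dup_alt b1 b2 =
      decide ((((PySem.Set.ofList b1).map (fun k => (b1.count k : Int) * (b2.count k : Int))).sum)
        = (b1.length : Int)) := by
  unfold is_dup_alt
  rw [PySem.Dict.foldl_insert_getD_add_one_eq_counter, PySem.Dict.foldl_insert_getD_add_one_eq_counter,
      PySem.Dict.items_counter]
  rw [PySem.List.foldl_add _ (fun kv : (Int × Int) × Int => kv.2 * (PySem.Dict.counter b2).getD kv.1 0) 0]
  simp [List.map_map, Function.comp_def, PySem.Dict.getD_counter]

lemma count_inst_eq (k : Int × Int) (l : List (Int × Int)) :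
    @List.count _ instBEqOfDecidableEq k l = @List.count _ instBEqProd k l := by
  induction l with
  | nil => rfl
  | cons a t ih => simp only [List.count_cons, ih]; by_cases h : a = k <;> simp [h]

-- sum over list = sum over distinct elements weighted by multiplicity
lemma sum_count_eq (b1 b2 : List (Int × Int)) :
    (b1.map (fun x => (b2.count x : Int))).sum
      = ((PySem.Set.ofList b1).map (fun k => (b1.count k : Int) * (b2.count k : Int))).sum := by
  rw [Finset.sum_list_map_count b1 (fun x => (b2.count x : Int))]
  have hset : (PySem.Set.ofList b1).toFinset = b1.toFinset := by
    ext x; simp [PySem.Set.mem_ofList]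
  rw [← hset, List.sum_toFinset _ (PySem.Set.nodup_ofList b1)]
  congr 1
  refine List.map_congr_left ?_
  intro k _
  simp
  left; exact count_inst_eq k b1

-- ===== VERDICT (by name: the statement is the Claim_ definition above) =====
theorem is_dup_spec : Claim_equal_is_dup := by
  intro b1 b2 _
  unfold Spec_is_dup
  rw [is_dup_eq, is_dup_alt_eq, sum_count_eq]
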